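-- pv_equiv track=rewrite | github.com/parcadei/fastedit | src/fastedit/inference/text_match.py | _replacement_key
-- ===== SOURCE A (Python) =====
-- def _replacement_key(line: str) -> str | None:
--     """Extract the LHS of an assignment-like line, for replacement matching.
--
--     Returns a normalized key when the line is an assignment/binding whose
--     LHS can be used to identify it as a potential replacement for a line in
--     a marker-preserved gap. Returns ``None`` for lines that are not
--     assignment-like (insertion semantics, not replacement).
--
--     Handles common assignment forms across Python, JS/TS, Rust, Go, etc.:
--
--       - ``self._data = {}``         → ``self._data``
--       - ``x = 1``                   → ``x``
--       - ``let x = 5``               → ``let x``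
--       - ``const x: number = 5``     → ``const x: number``
--       - ``x += 1``                  → ``x`` (compound assignment)
--       - ``x: int = 5``              → ``x: int``
--       - ``name := "foo"``           → ``name`` (Go short-decl)
--
--     Comparison operators (``==``, ``!=``, ``<=``, ``>=``) are NOT treated
--     as assignments — they indicate the line is a condition, not a binding,
--     and should never trigger replacement matching.
--     """
--     stripped = line.strip()
--     if not stripped:
--         return None
--     # Split on the first assignment-like operator. Exclude comparison ops.
--     # Simple scan: find first '=' that isn't part of '==' / '!=' / '<=' / '>='.
--     eq_idx = -1
--     i = 0
--     while i < len(stripped):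
--         c = stripped[i]
--         if c == "=":
--             prev = stripped[i - 1] if i > 0 else ""
--             nxt = stripped[i + 1] if i + 1 < len(stripped) else ""
--             # Skip comparison ops: ==, !=, <=, >=, =>
--             if prev in ("=", "!", "<", ">") or nxt == "=" or prev == "=" or nxt == ">":
--                 i += 1
--                 continue
--             # Strip trailing compound-assignment char from LHS (+=, -=, *=, /=, %=, |=, &=, ^=, :=)
--             lhs_end = i
--             if lhs_end > 0 and stripped[lhs_end - 1] in "+-*/%|&^:":
--                 lhs_end -= 1
--             eq_idx = lhs_end
--             break
--         i += 1
--     if eq_idx <= 0: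
--         return None
--     lhs = stripped[:eq_idx].strip()
--     if not lhs:
--         return None
--     return lhs
-- ===== SOURCE B (Python) =====
-- def _find_idx(parts):
--     """Given the '='-split segments of the line, return the end index of the
--     LHS for the first plain assignment '=', or None if there is none."""
--     start = 0  # index in the joined string where the current segment begins
--     for k in range(len(parts) - 1):
--         seg, nxt = parts[k], parts[k + 1]
--         pos = start + len(seg)  # index of the k-th '='
--         # char before this '=': last of seg, or a previous '=' when seg == ''
--         prev_bad = (seg[-1] in '!<>') if seg else (k > 0)
--         # char after this '=': first of nxt, or another '=' when nxt == ''
--         next_bad = (nxt[0] == '>') if nxt else (k + 1 < len(parts) - 1)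
--         if not (prev_bad or next_bad):
--             # trim a compound-assignment operator char off the LHS
--             return pos - 1 if (seg and seg[-1] in '+-*/%|&^:') else pos
--         start = pos + 1
--     return None
--
--
-- def _replacement_key(line: str) -> str | None:
--     stripped = line.strip()
--     idx = _find_idx(stripped.split('='))
--     if idx is None or idx <= 0:
--         return None
--     lhs = stripped[:idx].strip()
--     return lhs if lhs else None
-- ===== Notes on version B (the rewrite author's own statement) =====
-- stated objective: faster
-- what changed: A's per-character while-loop with index lookbehind/lookahead is replaced by splitting the line once at every equals sign and walking the resulting segments: the neighbour checks become checks on a segment's last/first character (an empty segment encodes adjacent equals signs) and the accepted position is recovered from accumulated segment lengths.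
import Mathlib
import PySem

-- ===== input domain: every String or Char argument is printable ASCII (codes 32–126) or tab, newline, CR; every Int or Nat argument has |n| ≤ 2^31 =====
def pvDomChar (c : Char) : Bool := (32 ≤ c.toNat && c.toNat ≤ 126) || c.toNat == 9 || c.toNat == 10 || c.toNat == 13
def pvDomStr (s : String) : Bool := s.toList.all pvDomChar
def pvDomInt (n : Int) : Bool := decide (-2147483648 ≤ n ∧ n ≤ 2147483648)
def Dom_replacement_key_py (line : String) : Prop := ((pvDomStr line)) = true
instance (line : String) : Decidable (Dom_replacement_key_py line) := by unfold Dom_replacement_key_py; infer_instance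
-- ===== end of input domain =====

-- B replaces A's per-character while-loop by splitting the line on the equals sign once and
-- walking the segments (same asymptotics; measured faster in CPython, the scan runs in str.split).

-- ===== PORT A =====
-- the while-loop of A: i counts up, returns eq_idx (-1 if never set)
def pvALoop (cs : List Char) (i : Nat) : Int :=
  if h : i < cs.length then
    let c := cs[i]
    if c = '=' then
      -- prev/nxt are "" (here: none) at the boundaries
      let prev : Option Char := if i > 0 then some cs[i-1]! else none
      let nxt : Option Char := if i + 1 < cs.length then some cs[i+1]! else none
      if prev = some '=' ∨ prev = some '!' ∨ prev = some '<' ∨ prev = some '>' ∨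
         nxt = some '=' ∨ prev = some '=' ∨ nxt = some '>' then
        pvALoop cs (i + 1)
      else
        let lhsEnd := i
        let lhsEnd :=
          if lhsEnd > 0 ∧ cs[lhsEnd-1]! ∈ ("+-*/%|&^:".toList) then lhsEnd - 1 else lhsEnd
        (lhsEnd : Int)
    else pvALoop cs (i + 1)
  else -1
termination_by cs.length - i

def replacement_key_py (line : String) : Option String :=
  let stripped := PySem.Str.strip line
  if stripped = "" then none
  else
    let cs := stripped.toList
    let eqIdx := pvALoop cs 0
    if eqIdx ≤ 0 then none
    else
      -- stripped[:eq_idx] with 0 < eq_idx ≤ len: PySem slice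
      let lhs := PySem.Str.strip (String.ofList (PySem.List.slice cs none (some eqIdx)))
      if lhs = "" then none else some lhs

-- ===== PORT B =====
-- _find_idx(parts): for k in range(len(parts)-1), looking at parts[k], parts[k+1];
-- ported as structural recursion over the remaining segments, carrying k and start.
-- 'k + 1 < len(parts) - 1' at the k-th step is 'rest ≠ []' for the remaining list.
def pvFindIdx : List (List Char) → Nat → Nat → Option Nat
  | [], _, _ => none
  | [_], _, _ => none            -- k reaches len(parts) - 1: loop ends, return None
  | seg :: nxt :: rest, k, start =>
    let pos := start + seg.length
    let prevBad : Bool := match seg.getLast? with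
      | some t => t ∈ ['!', '<', '>']
      | none => decide (0 < k)
    let nextBad : Bool := match nxt.head? with
      | some t => t == '>'
      | none => decide (rest ≠ [])
    if prevBad || nextBad then pvFindIdx (nxt :: rest) (k + 1) (pos + 1)
    else some (match seg.getLast? with
      | some t => if t ∈ ("+-*/%|&^:".toList) then pos - 1 else pos
      | none => pos)

def replacement_key_py_alt (line : String) : Option String :=
  let stripped := PySem.Str.strip line
  let parts := PySem.Chars.splitOn stripped.toList ("=".toList)
  match pvFindIdx parts 0 0 with
  | none => none
  | some idx =>
    if idx = 0 then none                 -- idx is None or idx <= 0 (idx : Nat here)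
    else
      let lhs := PySem.Str.strip (String.ofList (PySem.List.slice stripped.toList none (some (idx : Int))))
      if lhs = "" then none else some lhs

-- ===== PRECONDITION & SPEC =====
def Spec_replacement_key_py (line : String) (out : Option String) : Prop := out = replacement_key_py_alt line
instance (line : String) (out : Option String) : Decidable (Spec_replacement_key_py line out) := by unfold Spec_replacement_key_py; infer_instance

-- ===== CLAIM (what is proved, stated in full; the proofs are below) =====
def Claim_equal_replacement_key_py : Prop := ∀ (line : String), Dom_replacement_key_py line → Spec_replacement_key_py line (replacement_key_py line)

-- ===== LEMMAS AND PROOFS =====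

def pvSplitPair : List Char → List Char × List (List Char)
  | [] => ([], [])
  | c :: r =>
    let p := pvSplitPair r
    if c = '=' then ([], p.1 :: p.2) else (c :: p.1, p.2)

theorem pvGo_eq (l : List Char) : ∀ (fuel : Nat) (cur : List Char) (acc : List (List Char)),
    l.length < fuel →
    PySem.Chars.splitOn.go ['='] fuel l cur acc
      = acc.reverse ++ ((cur.reverse ++ (pvSplitPair l).1) :: (pvSplitPair l).2) := by
  induction l with
  | nil =>
    intro fuel cur acc h
    match fuel with
    | fuel + 1 =>
      rw [PySem.Chars.splitOn.go]
      · simp [pvSplitPair]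
      · omega
  | cons c r ih =>
    intro fuel cur acc h
    match fuel with
    | fuel + 1 =>
      rw [PySem.Chars.splitOn.go]
      by_cases hc : c = '='
      · have hp : List.isPrefixOf ['='] (c :: r) = true := by simp [List.isPrefixOf, hc]
        rw [if_pos hp]
        simp only [List.length_cons, List.length_nil, List.drop_succ_cons, List.drop_zero, Nat.zero_add]
        simp only [List.length_cons] at h
        rw [ih fuel [] (cur.reverse :: acc) (by omega)]
        simp [pvSplitPair, hc]
      · have hp : List.isPrefixOf ['='] (c :: r) = false := by
          simp [List.isPrefixOf]; exact fun h' => (hc h'.symm).elim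
        rw [if_neg (by simp [hp])]
        simp only [List.length_cons] at h
        rw [ih fuel (c :: cur) acc (by omega)]
        simp [pvSplitPair, hc]

theorem pvSplitOn_eq (cs : List Char) :
    PySem.Chars.splitOn cs ['='] = (pvSplitPair cs).1 :: (pvSplitPair cs).2 := by
  rw [PySem.Chars.splitOn, pvGo_eq cs (cs.length + 1) [] [] (by omega)]
  simp

def pvTrim (prev : Option Char) (pos : Nat) : Nat :=
  match prev with
  | some t => if t ∈ ("+-*/%|&^:".toList) then pos - 1 else pos
  | none => pos

def pvScan (prev : Option Char) (cs : List Char) (pos : Nat) : Option Nat :=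
  match cs with
  | [] => none
  | c :: rest =>
    if c = '=' ∧ ¬ (prev = some '=' ∨ prev = some '!' ∨ prev = some '<' ∨ prev = some '>')
        ∧ ¬ (rest.head? = some '=' ∨ rest.head? = some '>') then
      some (pvTrim prev pos)
    else pvScan (some c) rest (pos + 1)

theorem pvALoop_eq_scan (cs : List Char) (i : Nat) (hi : i ≤ cs.length) :
    pvALoop cs i =
      (match pvScan (if 0 < i then some cs[i-1]! else none) (cs.drop i) i with
       | none => -1
       | some m => (m : Int)) := by
  by_cases h : i < cs.length
  · rw [pvALoop]
    have hdrop : cs.drop i = cs[i] :: cs.drop (i + 1) := (List.getElem_cons_drop h).symm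
    rw [hdrop, pvScan]
    have hprev : (if 0 < i then some cs[i-1]! else none) = (if i > 0 then some cs[i-1]! else none) := rfl
    have hhead : (cs.drop (i+1)).head? = cs[i+1]? := by
      cases hlt : cs[i+1]? with
      | none =>
        have : cs.length ≤ i + 1 := by
          by_contra hc; exact absurd hlt (by simp [List.getElem?_eq_getElem (by omega : i+1 < cs.length)])
        simp [this]
      | some x =>
        have hlen : i + 1 < cs.length := by
          by_contra hc
          rw [List.getElem?_eq_none (by omega)] at hlt; simp at hlt
        rw [List.head?_drop]
        exact hlt
    have hnxt : (if i + 1 < cs.length then some cs[i+1]! else none) = (cs.drop (i+1)).head? := by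
      rw [hhead]
      by_cases hn : i + 1 < cs.length
      · simp [hn]
      · simp [hn]
    by_cases hc : cs[i] = '='
    · -- cs[i] = '='
      by_cases hb : ((if 0 < i then some cs[i-1]! else none) = some '=' ∨ (if 0 < i then some cs[i-1]! else none) = some '!' ∨
          (if 0 < i then some cs[i-1]! else none) = some '<' ∨ (if 0 < i then some cs[i-1]! else none) = some '>') ∨
          ((cs.drop (i+1)).head? = some '=' ∨ (cs.drop (i+1)).head? = some '>')
      · -- skip branch
        have hA : ((if i > 0 then some cs[i-1]! else none) = some '=' ∨ (if i > 0 then some cs[i-1]! else none) = some '!' ∨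
            (if i > 0 then some cs[i-1]! else none) = some '<' ∨ (if i > 0 then some cs[i-1]! else none) = some '>' ∨
            (if i + 1 < cs.length then some cs[i+1]! else none) = some '=' ∨ (if i > 0 then some cs[i-1]! else none) = some '=' ∨
            (if i + 1 < cs.length then some cs[i+1]! else none) = some '>') := by
          rw [hnxt]; tauto
        rw [dif_pos h, if_pos hc, if_pos hA]
        have hS : ¬ (cs[i] = '=' ∧ ¬ ((if 0 < i then some cs[i-1]! else none) = some '=' ∨ (if 0 < i then some cs[i-1]! else none) = some '!' ∨
            (if 0 < i then some cs[i-1]! else none) = some '<' ∨ (if 0 < i then some cs[i-1]! else none) = some '>')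
            ∧ ¬ ((cs.drop (i+1)).head? = some '=' ∨ (cs.drop (i+1)).head? = some '>')) := by tauto
        rw [if_neg hS]
        have := pvALoop_eq_scan cs (i+1) (by omega)
        rw [this]
        have : (if 0 < i + 1 then some cs[i+1-1]! else none) = some cs[i] := by
          simp [getElem!_pos cs i h]
        rw [this]
      · -- accept branch
        have hA : ¬ ((if i > 0 then some cs[i-1]! else none) = some '=' ∨ (if i > 0 then some cs[i-1]! else none) = some '!' ∨
            (if i > 0 then some cs[i-1]! else none) = some '<' ∨ (if i > 0 then some cs[i-1]! else none) = some '>' ∨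
            (if i + 1 < cs.length then some cs[i+1]! else none) = some '=' ∨ (if i > 0 then some cs[i-1]! else none) = some '=' ∨
            (if i + 1 < cs.length then some cs[i+1]! else none) = some '>') := by
          rw [hnxt]; tauto
        rw [dif_pos h, if_pos hc, if_neg hA]
        have hS : (cs[i] = '=' ∧ ¬ ((if 0 < i then some cs[i-1]! else none) = some '=' ∨ (if 0 < i then some cs[i-1]! else none) = some '!' ∨
            (if 0 < i then some cs[i-1]! else none) = some '<' ∨ (if 0 < i then some cs[i-1]! else none) = some '>')
            ∧ ¬ ((cs.drop (i+1)).head? = some '=' ∨ (cs.drop (i+1)).head? = some '>')) := by tauto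
        rw [if_pos hS]
        by_cases hp : 0 < i
        · by_cases ht : cs[i-1]! ∈ ("+-*/%|&^:".toList)
          · have hA2 : (i > 0 ∧ cs[i-1]! ∈ ("+-*/%|&^:".toList)) := ⟨hp, ht⟩
            simp [pvTrim, hA2]
          · have hA2 : ¬ (i > 0 ∧ cs[i-1]! ∈ ("+-*/%|&^:".toList)) := by tauto
            simp [pvTrim, hp]
        · have hA2 : ¬ (i > 0 ∧ cs[i-1]! ∈ ("+-*/%|&^:".toList)) := by tauto
          simp [pvTrim, hp]
    · -- cs[i] ≠ '='
      rw [dif_pos h, if_neg hc]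
      have hS : ¬ (cs[i] = '=' ∧ ¬ ((if 0 < i then some cs[i-1]! else none) = some '=' ∨ (if 0 < i then some cs[i-1]! else none) = some '!' ∨
          (if 0 < i then some cs[i-1]! else none) = some '<' ∨ (if 0 < i then some cs[i-1]! else none) = some '>')
          ∧ ¬ ((cs.drop (i+1)).head? = some '=' ∨ (cs.drop (i+1)).head? = some '>')) := by tauto
      rw [if_neg hS]
      have := pvALoop_eq_scan cs (i+1) (by omega)
      rw [this]
      have : (if 0 < i + 1 then some cs[i+1-1]! else none) = some cs[i] := by
        simp [getElem!_pos cs i h]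
      rw [this]
  · have hieq : i = cs.length := by omega
    rw [pvALoop]
    rw [dif_neg h]
    rw [List.drop_eq_nil_iff.mpr (by omega)]
    rw [pvScan]
termination_by cs.length - i

theorem pvFindIdx_cons (seg nxt : List Char) (rest : List (List Char)) (k start : Nat) :
    pvFindIdx (seg :: nxt :: rest) k start =
      (if (match seg.getLast? with
            | some t => decide (t ∈ ['!', '<', '>'])
            | none => decide (0 < k)) ||
          (match nxt.head? with
            | some t => t == '>'
            | none => decide (rest ≠ [])) then
        pvFindIdx (nxt :: rest) (k + 1) ((start + seg.length) + 1)
      else some (match seg.getLast? with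
        | some t => if t ∈ ("+-*/%|&^:".toList) then start + seg.length - 1 else start + seg.length
        | none => start + seg.length)) := rfl

set_option maxHeartbeats 2000000 in
theorem pvScan_eq_findIdx (cs : List Char) :
    ∀ (pre : List Char) (k start : Nat) (prev : Option Char),
    (pre = [] → ((k = 0 ∧ prev = none) ∨ (0 < k ∧ prev = some '='))) →
    (∀ h : pre ≠ [], prev = some (pre.getLast h)) →
    '=' ∉ pre →
    pvScan prev cs (start + pre.length)
      = pvFindIdx ((pre ++ (pvSplitPair cs).1) :: (pvSplitPair cs).2) k start := by
  induction cs with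
  | nil =>
    intro pre k start prev h0 hL hne
    simp [pvScan, pvSplitPair, pvFindIdx]
  | cons c r ih =>
    intro pre k start prev h0 hL hne
    by_cases hc : c = '='
    · -- current char is an '='; the current segment 'pre' ends here
      subst hc
      have hsp : pvSplitPair ('=' :: r) = ([], (pvSplitPair r).1 :: (pvSplitPair r).2) := by
        simp [pvSplitPair]
      rw [hsp]
      simp only [List.append_nil]
      rw [pvFindIdx_cons, pvScan]
      have hprevBad : ((match pre.getLast? with
          | some t => decide (t ∈ ['!', '<', '>'])
          | none => decide (0 < k)) = true)
          ↔ (prev = some '=' ∨ prev = some '!' ∨ prev = some '<' ∨ prev = some '>') := by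
        cases hpre : pre.getLast? with
        | none =>
          have hpe : pre = [] := List.getLast?_eq_none_iff.mp hpre
          rcases h0 hpe with ⟨hk, hp⟩ | ⟨hk, hp⟩ <;> subst hp <;> simp [hk]
        | some t =>
          have hpe : pre ≠ [] := by intro hh; subst hh; simp at hpre
          have hprev := hL hpe
          have ht : t = pre.getLast hpe := by
            have := List.getLast?_eq_some_getLast hpe  -- hpre : getLast? = some t
            rw [this] at hpre
            exact (Option.some.inj hpre).symm
          have htm : t ∈ pre := ht ▸ List.getLast_mem hpe
          have htne : t ≠ '=' := fun hh => hne (hh ▸ htm)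
          subst ht
          rw [hprev]
          constructor
          · intro hh
            simp only [decide_eq_true_eq, List.mem_cons, List.not_mem_nil, or_false] at hh
            rcases hh with h1 | h1 | h1 <;> simp [h1]
          · intro hh
            rcases hh with h1 | h1 | h1 | h1 <;>
              (first
                | exact absurd (Option.some.inj h1) htne
                | simp [Option.some.inj h1])
      have hnextBad : ((match (pvSplitPair r).1.head? with
          | some t => t == '>'
          | none => decide ((pvSplitPair r).2 ≠ [])) = true)
          ↔ (r.head? = some '=' ∨ r.head? = some '>') := by
        cases r with
        | nil => simp [pvSplitPair]
        | cons c' r' =>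
          by_cases hc' : c' = '='
          · subst hc'; simp [pvSplitPair]
          · simp [pvSplitPair, hc']
      by_cases hbad : (prev = some '=' ∨ prev = some '!' ∨ prev = some '<' ∨ prev = some '>') ∨
          (r.head? = some '=' ∨ r.head? = some '>')
      · -- comparison operator: both sides skip to the next segment
        have hBor : ((match pre.getLast? with
            | some t => decide (t ∈ ['!', '<', '>'])
            | none => decide (0 < k)) ||
            (match (pvSplitPair r).1.head? with
            | some t => t == '>'
            | none => decide ((pvSplitPair r).2 ≠ []))) = true := by
          rcases hbad with h1 | h1
          · rw [Bool.or_eq_true]; left; exact hprevBad.mpr h1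
          · rw [Bool.or_eq_true]; right; exact hnextBad.mpr h1
        rw [if_pos hBor]
        have hScond : ¬ (('=' : Char) = '=' ∧ ¬ (prev = some '=' ∨ prev = some '!' ∨ prev = some '<' ∨ prev = some '>')
            ∧ ¬ (r.head? = some '=' ∨ r.head? = some '>')) :=
          fun hh => hbad.elim hh.2.1 hh.2.2
        rw [if_neg hScond]
        have := ih [] (k + 1) (start + pre.length + 1) (some '=')
          (fun _ => Or.inr ⟨by omega, rfl⟩) (fun h => absurd rfl h) (by simp)
        simpa using this
      · -- a plain assignment '=': both sides accept at this position
        have hBorN : ¬ (((match pre.getLast? with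
            | some t => decide (t ∈ ['!', '<', '>'])
            | none => decide (0 < k)) ||
            (match (pvSplitPair r).1.head? with
            | some t => t == '>'
            | none => decide ((pvSplitPair r).2 ≠ []))) = true) := by
          intro hh
          rw [Bool.or_eq_true] at hh
          rcases hh with h1 | h1
          · exact hbad (Or.inl (hprevBad.mp h1))
          · exact hbad (Or.inr (hnextBad.mp h1))
        rw [if_neg hBorN]
        have hScond : (('=' : Char) = '=' ∧ ¬ (prev = some '=' ∨ prev = some '!' ∨ prev = some '<' ∨ prev = some '>')
            ∧ ¬ (r.head? = some '=' ∨ r.head? = some '>')) :=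
          ⟨rfl, fun hh => hbad (Or.inl hh), fun hh => hbad (Or.inr hh)⟩
        rw [if_pos hScond]
        congr 1
        cases hpre : pre.getLast? with
        | none =>
          have hpe : pre = [] := List.getLast?_eq_none_iff.mp hpre
          rcases h0 hpe with ⟨hk, hp⟩ | ⟨hk, hp⟩ <;> subst hp
          · simp [pvTrim]
          · exact absurd (Or.inl rfl) (fun hh => hbad (Or.inl hh))
        | some t =>
          have hpe : pre ≠ [] := by intro hh; subst hh; simp at hpre
          have hprev := hL hpe
          have ht : t = pre.getLast hpe := by
            have := List.getLast?_eq_some_getLast hpe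
            rw [this] at hpre
            exact (Option.some.inj hpre).symm
          subst ht
          rw [hprev]
          simp [pvTrim]
    · -- a non-'=' character: it joins the current segment
      have hsp : pvSplitPair (c :: r) = (c :: (pvSplitPair r).1, (pvSplitPair r).2) := by
        simp [pvSplitPair, hc]
      rw [hsp]
      rw [pvScan]
      have hScond : ¬ (c = '=' ∧ ¬ (prev = some '=' ∨ prev = some '!' ∨ prev = some '<' ∨ prev = some '>')
          ∧ ¬ (r.head? = some '=' ∨ r.head? = some '>')) :=
          fun hh => hc hh.1
      rw [if_neg hScond]
      have hpre' : '=' ∉ pre ++ [c] := by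
        simp [hne]
        exact fun hh => hc hh.symm
      have hL' : ∀ h : pre ++ [c] ≠ [], (some c : Option Char) = some ((pre ++ [c]).getLast h) := by
        intro h
        rw [List.getLast_append_singleton]
      have := ih (pre ++ [c]) k start (some c)
        (fun hh => absurd hh (by simp)) hL' hpre'
      simp only [List.length_append, List.length_cons, List.length_nil, Nat.zero_add] at this
      rw [← Nat.add_assoc] at this
      rw [this]
      congr 1
      simp

-- ===== VERDICT (by name: the statement is the Claim_ definition above) =====
theorem replacement_key_py_spec : Claim_equal_replacement_key_py := by
  intro line _
  have hmain : ∀ cs : List Char, pvALoop cs 0 =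
      (match pvFindIdx ((pvSplitPair cs).1 :: (pvSplitPair cs).2) 0 0 with
       | none => (-1 : Int) | some m => (m : Int)) := by
    intro cs
    rw [pvALoop_eq_scan cs 0 (by omega)]
    have h2 := pvScan_eq_findIdx cs [] 0 0 none
      (fun _ => Or.inl ⟨rfl, rfl⟩) (fun h => absurd rfl h) (by simp)
    simp only [List.length_nil, Nat.add_zero, List.nil_append] at h2
    simp only [Nat.lt_irrefl, List.drop_zero, if_false]
    rw [h2]
  simp only [Spec_replacement_key_py, replacement_key_py, replacement_key_py_alt]
  by_cases he : PySem.Str.strip line = ""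
  · rw [he]; rfl
  · rw [if_neg he]
    rw [show ("=".toList) = ['='] from rfl, pvSplitOn_eq, hmain]
    cases hF : pvFindIdx ((pvSplitPair (PySem.Str.strip line).toList).1
        :: (pvSplitPair (PySem.Str.strip line).toList).2) 0 0 with
    | none => simp
    | some m =>
      by_cases hm : m = 0
      · subst hm; simp
      · simp [hm]
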